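-- pv_equiv track=rewrite | github.com/Lee-sungheon/TIL | coding_test/line2.py | solution
-- ===== SOURCE A (Python) =====
-- def solution(inp_str):
--     answer = []
--     n = len(inp_str)
--     cnt = [0]*5
--     special = ['~', '!', '@', '#', '$', '%', '^', '&', '*']
--     word = inp_str[0]
--     same_cnt = 1
--     if n > 15 or n < 8:
--         answer.append(1)
--     for i in range(n):
--         if 'A' <= inp_str[i] <= 'Z':
--             cnt[0] += 1
--         elif 'a' <= inp_str[i] <= 'z':
--             cnt[1] += 1
--         elif '0' <= inp_str[i] <= '9':
--             cnt[2] += 1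
--         elif inp_str[i] in special:
--             cnt[3] += 1
--         else:
--             cnt[4] += 1
--
--         if i != 0:
--             if same_cnt >= 4:
--                 continue
--             if word == inp_str[i]:
--                 same_cnt += 1
--             else:
--                 same_cnt = 1
--             word = inp_str[i]
--
--     if cnt[4] > 0:
--         answer.append(2)
--     if cnt[0:4].count(0) > 1:
--         answer.append(3)
--
--     if same_cnt >= 4:
--         answer.append(4)
--
--     same = list(set(list(inp_str)))
--     for s in same:
--         if inp_str.count(s) >= 5:
--             answer.append(5)
--
--     if len(answer) == 0:
--         answer.append(0)
--
--     return answer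
-- ===== SOURCE B (Python) =====
-- def solution(inp_str):
--     n = len(inp_str)
--     answer = [1] if n > 15 or n < 8 else []
--
--     # sort once: every maximal run in the sorted copy holds ALL occurrences of one char
--     upper = lower = digit = spec = other = 0
--     fives = []
--     chars = sorted(inp_str)
--     i = 0
--     while i < n:
--         j = i + 1
--         while j < n and chars[j] == chars[i]:
--             j += 1
--         c, run = chars[i], j - i
--         if 'A' <= c <= 'Z':
--             upper += run
--         elif 'a' <= c <= 'z':
--             lower += run
--         elif '0' <= c <= '9':
--             digit += run
--         elif c in '~!@#$%^&*':
--             spec += run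
--         else:
--             other += run
--         if run >= 5:
--             fives.append(5)
--         i = j
--
--     if other > 0:
--         answer.append(2)
--     if [upper, lower, digit, spec].count(0) > 1:
--         answer.append(3)
--     if any(a == b == c == d for a, b, c, d in
--            zip(inp_str, inp_str[1:], inp_str[2:], inp_str[3:])):
--         answer.append(4)
--     answer += fives
--     return answer or [0]
-- ===== Notes on version B (the rewrite author's own statement) =====
-- stated objective: alternative
-- what changed: A's single fused index loop (elif category counters plus a freeze-on->=4 run counter) followed by a per-distinct-char .count scan is replaced by a sort-then-group algorithm: the string is sorted once and scanned as maximal equal runs, each run giving its whole character's multiplicity at once (category totals and one 5 per run of length >= 5), while code 4 is detected by a zip sliding window over four staggered copies of the string.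
-- crash fix: A raises IndexError on the empty string (it reads inp_str[0] before the loop); B returns [1, 3] there. — e.g. on solution(""): A raises IndexError, B returns [1, 3]
import Mathlib
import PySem

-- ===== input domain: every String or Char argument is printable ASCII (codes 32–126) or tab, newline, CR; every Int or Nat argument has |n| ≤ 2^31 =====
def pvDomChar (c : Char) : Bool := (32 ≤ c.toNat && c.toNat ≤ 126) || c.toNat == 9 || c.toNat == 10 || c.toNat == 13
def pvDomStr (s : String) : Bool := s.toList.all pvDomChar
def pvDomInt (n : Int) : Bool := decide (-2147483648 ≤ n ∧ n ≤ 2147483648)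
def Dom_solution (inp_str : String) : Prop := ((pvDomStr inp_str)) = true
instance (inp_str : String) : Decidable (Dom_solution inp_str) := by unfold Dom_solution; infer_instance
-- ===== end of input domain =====

-- B replaces A's fused index loop and per-distinct-char count scan by a sort-then-group scan over
-- maximal equal runs of the sorted string, with a zip sliding window for the repeated-run code 4;
-- objective: alternative algorithm.

-- ===== PORT A =====
def pvSpecial : List Char := ['~', '!', '@', '#', '$', '%', '^', '&', '*']

structure PvAState where
  c0 : Int
  c1 : Int
  c2 : Int
  c3 : Int
  c4 : Int
  word : Char
  same : Int
deriving Repr, DecidableEq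

-- the elif chain of A's loop body (cnt[0] += 1 …)
def pvStepCnt (s : PvAState) (c : Char) : PvAState :=
  if 'A' ≤ c ∧ c ≤ 'Z' then { s with c0 := s.c0 + 1 }
  else if 'a' ≤ c ∧ c ≤ 'z' then { s with c1 := s.c1 + 1 }
  else if '0' ≤ c ∧ c ≤ '9' then { s with c2 := s.c2 + 1 }
  else if c ∈ pvSpecial then { s with c3 := s.c3 + 1 }
  else { s with c4 := s.c4 + 1 }

-- one iteration of A's `for i in range(n)` loop: the elif chain, then the `if i != 0` run tracking
def pvStepA (s : PvAState) (p : Int × Char) : PvAState :=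
  if p.1 ≠ 0 then
    if (pvStepCnt s p.2).same ≥ 4 then pvStepCnt s p.2
    else if (pvStepCnt s p.2).word = p.2 then
      { pvStepCnt s p.2 with same := (pvStepCnt s p.2).same + 1, word := p.2 }
    else { pvStepCnt s p.2 with same := 1, word := p.2 }
  else pvStepCnt s p.2

def solution (inp_str : String) : List Int :=
  match inp_str.toList with
  | [] => []  -- Python raises IndexError indexing the first character here; excluded by Pre_solution
  | w0 :: _ =>
    let l := inp_str.toList
    let n : Int := l.length
    let answer : List Int := if n > 15 ∨ n < 8 then [1] else []
    let st := (PySem.List.enumerate l).foldl pvStepA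
      { c0 := 0, c1 := 0, c2 := 0, c3 := 0, c4 := 0, word := w0, same := 1 }
    let answer := if st.c4 > 0 then answer ++ [2] else answer
    let answer := if ([st.c0, st.c1, st.c2, st.c3].count 0) > 1 then answer ++ [3] else answer
    let answer := if st.same ≥ 4 then answer ++ [4] else answer
    let answer := (PySem.Set.ofList l).foldl
      (fun a s => if 5 ≤ PySem.List.count l s then a ++ [(5 : Int)] else a) answer
    if answer.length = 0 then [0] else answer

-- ===== PORT B =====
structure PvBState where
  upper : Int
  lower : Int
  digit : Int
  spec  : Int
  other : Int
  fives : List Int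
deriving Repr, DecidableEq

-- Source B's elif chain: add the whole run length to the class of its character
def pvAddRun (st : PvBState) (c : Char) (run : Int) : PvBState :=
  if 'A' ≤ c ∧ c ≤ 'Z' then { st with upper := st.upper + run }
  else if 'a' ≤ c ∧ c ≤ 'z' then { st with lower := st.lower + run }
  else if '0' ≤ c ∧ c ≤ '9' then { st with digit := st.digit + run }
  else if c ∈ pvSpecial then { st with spec := st.spec + run }
  else { st with other := st.other + run }

-- Source B's `if run >= 5: fives.append(5)`
def pvNote5 (st : PvBState) (run : Int) : PvBState :=
  if run ≥ 5 then { st with fives := st.fives ++ [5] } else st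

-- the outer `while i < n` loop of Source B: one recursive call per maximal run of the sorted list;
-- the inner `while j < n and chars[j] == chars[i]` advance is the takeWhile/dropWhile split
def pvScanRuns (st : PvBState) (chars : List Char) : PvBState :=
  match chars with
  | [] => st
  | c :: rest =>
    pvScanRuns
      (pvNote5 (pvAddRun st c ((rest.takeWhile (fun x => x == c)).length + 1))
        ((rest.takeWhile (fun x => x == c)).length + 1))
      (rest.dropWhile (fun x => x == c))
termination_by chars.length
decreasing_by
  simp only [List.length_cons]
  exact Nat.lt_succ_of_le (List.length_dropWhile_le _ _)

-- zip(inp_str, inp_str[1:], inp_str[2:], inp_str[3:]) (a string slice s[k:] is drop k)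
def pvQuads (l : List Char) : List (Char × Char × Char × Char) :=
  List.zip l (List.zip (l.drop 1) (List.zip (l.drop 2) (l.drop 3)))

def solution_alt (inp_str : String) : List Int :=
  let l := inp_str.toList
  let n : Int := l.length
  let answer : List Int := if n > 15 ∨ n < 8 then [1] else []
  let st := pvScanRuns ⟨0, 0, 0, 0, 0, []⟩ (PySem.List.sorted l (fun x => x) false)
  let answer := if st.other > 0 then answer ++ [2] else answer
  let answer := if ([st.upper, st.lower, st.digit, st.spec].count 0) > 1 then answer ++ [3] else answer
  let answer := if (pvQuads l).any (fun q => q.1 == q.2.1 && q.2.1 == q.2.2.1 && q.2.2.1 == q.2.2.2)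
    then answer ++ [4] else answer
  let answer := answer ++ st.fives
  if answer = [] then [0] else answer

-- ===== PRECONDITION & SPEC =====
-- Pre_ excludes only the empty string, on which A raises IndexError reading the first character.
def Pre_solution (inp_str : String) : Prop := inp_str ≠ ""
instance (inp_str : String) : Decidable (Pre_solution inp_str) := by unfold Pre_solution; infer_instance
def pvWitness_solution : String := "Aa1~Aa1~"

-- A raises IndexError exactly on the empty string; B returns [1, 3] there.
def Raises_solution (inp_str : String) : Prop := inp_str = ""
instance (inp_str : String) : Decidable (Raises_solution inp_str) := by unfold Raises_solution; infer_instance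
def pvRaiseWitness_solution : String := ""
def pvRaiseWitnessOut_solution : List Int := [1, 3]

def Spec_solution (inp_str : String) (out : List Int) : Prop := out = solution_alt inp_str
instance (inp_str : String) (out : List Int) : Decidable (Spec_solution inp_str out) := by unfold Spec_solution; infer_instance

-- ===== CLAIM (what is proved, stated in full; the proofs are below) =====
def Claim_equal_solution : Prop := ∀ (inp_str : String), Dom_solution inp_str → Pre_solution inp_str → Spec_solution inp_str (solution inp_str)
def Claim_raises_solution : Prop := (∀ (inp_str : String), Dom_solution inp_str → Raises_solution inp_str → ¬ Pre_solution inp_str) ∧ (Dom_solution (pvRaiseWitness_solution) ∧ Raises_solution (pvRaiseWitness_solution) ∧ solution_alt (pvRaiseWitness_solution) = pvRaiseWitnessOut_solution)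

-- ===== LEMMAS AND PROOFS =====

-- the character classes cut out by A's (and B's) elif chain
abbrev pvP0 (c : Char) : Prop := 'A' ≤ c ∧ c ≤ 'Z'
abbrev pvC1 (c : Char) : Prop := ¬pvP0 c ∧ ('a' ≤ c ∧ c ≤ 'z')
abbrev pvC2 (c : Char) : Prop := ¬pvP0 c ∧ ¬('a' ≤ c ∧ c ≤ 'z') ∧ ('0' ≤ c ∧ c ≤ '9')
abbrev pvC3 (c : Char) : Prop := ¬pvP0 c ∧ ¬('a' ≤ c ∧ c ≤ 'z') ∧ ¬('0' ≤ c ∧ c ≤ '9') ∧ c ∈ pvSpecial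
abbrev pvC4 (c : Char) : Prop := ¬pvP0 c ∧ ¬('a' ≤ c ∧ c ≤ 'z') ∧ ¬('0' ≤ c ∧ c ≤ '9') ∧ ¬(c ∈ pvSpecial)

theorem pvStepCnt_c0 (s : PvAState) (c : Char) :
    (pvStepCnt s c).c0 = s.c0 + (if pvP0 c then 1 else 0) := by
  unfold pvStepCnt
  by_cases h1 : 'A' ≤ c ∧ c ≤ 'Z'
  · rw [if_pos h1, if_pos (h1 : pvP0 c)]
  by_cases h2 : 'a' ≤ c ∧ c ≤ 'z'
  · rw [if_neg h1, if_pos h2, if_neg (h1 : ¬ pvP0 c), add_zero]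
  by_cases h3 : '0' ≤ c ∧ c ≤ '9'
  · rw [if_neg h1, if_neg h2, if_pos h3, if_neg (h1 : ¬ pvP0 c), add_zero]
  by_cases h4 : c ∈ pvSpecial
  · rw [if_neg h1, if_neg h2, if_neg h3, if_pos h4, if_neg (h1 : ¬ pvP0 c), add_zero]
  · rw [if_neg h1, if_neg h2, if_neg h3, if_neg h4, if_neg (h1 : ¬ pvP0 c), add_zero]

theorem pvStepCnt_c1 (s : PvAState) (c : Char) :
    (pvStepCnt s c).c1 = s.c1 + (if pvC1 c then 1 else 0) := by
  unfold pvStepCnt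
  by_cases h1 : 'A' ≤ c ∧ c ≤ 'Z'
  · rw [if_pos h1, if_neg (fun hc : pvC1 c => hc.1 h1), add_zero]
  by_cases h2 : 'a' ≤ c ∧ c ≤ 'z'
  · rw [if_neg h1, if_pos h2, if_pos (⟨h1, h2⟩ : pvC1 c)]
  by_cases h3 : '0' ≤ c ∧ c ≤ '9'
  · rw [if_neg h1, if_neg h2, if_pos h3, if_neg (fun hc : pvC1 c => h2 hc.2), add_zero]
  by_cases h4 : c ∈ pvSpecial
  · rw [if_neg h1, if_neg h2, if_neg h3, if_pos h4, if_neg (fun hc : pvC1 c => h2 hc.2), add_zero]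
  · rw [if_neg h1, if_neg h2, if_neg h3, if_neg h4, if_neg (fun hc : pvC1 c => h2 hc.2), add_zero]

theorem pvStepCnt_c2 (s : PvAState) (c : Char) :
    (pvStepCnt s c).c2 = s.c2 + (if pvC2 c then 1 else 0) := by
  unfold pvStepCnt
  by_cases h1 : 'A' ≤ c ∧ c ≤ 'Z'
  · rw [if_pos h1, if_neg (fun hc : pvC2 c => hc.1 h1), add_zero]
  by_cases h2 : 'a' ≤ c ∧ c ≤ 'z'
  · rw [if_neg h1, if_pos h2, if_neg (fun hc : pvC2 c => hc.2.1 h2), add_zero]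
  by_cases h3 : '0' ≤ c ∧ c ≤ '9'
  · rw [if_neg h1, if_neg h2, if_pos h3, if_pos (⟨h1, h2, h3⟩ : pvC2 c)]
  by_cases h4 : c ∈ pvSpecial
  · rw [if_neg h1, if_neg h2, if_neg h3, if_pos h4, if_neg (fun hc : pvC2 c => h3 hc.2.2), add_zero]
  · rw [if_neg h1, if_neg h2, if_neg h3, if_neg h4, if_neg (fun hc : pvC2 c => h3 hc.2.2), add_zero]

theorem pvStepCnt_c3 (s : PvAState) (c : Char) :
    (pvStepCnt s c).c3 = s.c3 + (if pvC3 c then 1 else 0) := by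
  unfold pvStepCnt
  by_cases h1 : 'A' ≤ c ∧ c ≤ 'Z'
  · rw [if_pos h1, if_neg (fun hc : pvC3 c => hc.1 h1), add_zero]
  by_cases h2 : 'a' ≤ c ∧ c ≤ 'z'
  · rw [if_neg h1, if_pos h2, if_neg (fun hc : pvC3 c => hc.2.1 h2), add_zero]
  by_cases h3 : '0' ≤ c ∧ c ≤ '9'
  · rw [if_neg h1, if_neg h2, if_pos h3, if_neg (fun hc : pvC3 c => hc.2.2.1 h3), add_zero]
  by_cases h4 : c ∈ pvSpecial
  · rw [if_neg h1, if_neg h2, if_neg h3, if_pos h4, if_pos (⟨h1, h2, h3, h4⟩ : pvC3 c)]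
  · rw [if_neg h1, if_neg h2, if_neg h3, if_neg h4, if_neg (fun hc : pvC3 c => h4 hc.2.2.2), add_zero]

theorem pvStepCnt_c4 (s : PvAState) (c : Char) :
    (pvStepCnt s c).c4 = s.c4 + (if pvC4 c then 1 else 0) := by
  unfold pvStepCnt
  by_cases h1 : 'A' ≤ c ∧ c ≤ 'Z'
  · rw [if_pos h1, if_neg (fun hc : pvC4 c => hc.1 h1), add_zero]
  by_cases h2 : 'a' ≤ c ∧ c ≤ 'z'
  · rw [if_neg h1, if_pos h2, if_neg (fun hc : pvC4 c => hc.2.1 h2), add_zero]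
  by_cases h3 : '0' ≤ c ∧ c ≤ '9'
  · rw [if_neg h1, if_neg h2, if_pos h3, if_neg (fun hc : pvC4 c => hc.2.2.1 h3), add_zero]
  by_cases h4 : c ∈ pvSpecial
  · rw [if_neg h1, if_neg h2, if_neg h3, if_pos h4, if_neg (fun hc : pvC4 c => hc.2.2.2 h4), add_zero]
  · rw [if_neg h1, if_neg h2, if_neg h3, if_neg h4, if_pos (⟨h1, h2, h3, h4⟩ : pvC4 c)]

theorem pvStepCnt_word (s : PvAState) (c : Char) : (pvStepCnt s c).word = s.word := by
  unfold pvStepCnt; split_ifs <;> rfl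

theorem pvStepCnt_same (s : PvAState) (c : Char) : (pvStepCnt s c).same = s.same := by
  unfold pvStepCnt; split_ifs <;> rfl

-- the run-tracking tail of A's step leaves the counters of the elif chain unchanged
theorem pvStepA_cnt (s : PvAState) (p : Int × Char) :
    (pvStepA s p).c0 = (pvStepCnt s p.2).c0 ∧ (pvStepA s p).c1 = (pvStepCnt s p.2).c1 ∧
    (pvStepA s p).c2 = (pvStepCnt s p.2).c2 ∧ (pvStepA s p).c3 = (pvStepCnt s p.2).c3 ∧
    (pvStepA s p).c4 = (pvStepCnt s p.2).c4 := by
  unfold pvStepA; split_ifs <;> exact ⟨rfl, rfl, rfl, rfl, rfl⟩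

theorem pvStepA_zero (s : PvAState) (p : Int × Char) (hp : p.1 = 0) :
    (pvStepA s p).word = s.word ∧ (pvStepA s p).same = s.same := by
  unfold pvStepA
  rw [if_neg (by omega : ¬ p.1 ≠ 0)]
  exact ⟨pvStepCnt_word s p.2, pvStepCnt_same s p.2⟩


theorem pvStepA_run (s : PvAState) (p : Int × Char) (hp : p.1 ≠ 0) :
    (pvStepA s p).word = (if s.same ≥ 4 then s.word else p.2) ∧
    (pvStepA s p).same = (if s.same ≥ 4 then s.same else if s.word = p.2 then s.same + 1 else 1) := by
  unfold pvStepA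
  rw [if_pos hp]
  simp only [pvStepCnt_word, pvStepCnt_same]
  split_ifs <;>
    first
      | exact ⟨pvStepCnt_word s p.2, pvStepCnt_same s p.2⟩
      | exact ⟨rfl, rfl⟩

theorem pvFoldA_counts (el : List (Int × Char)) : ∀ s : PvAState,
    (el.foldl pvStepA s).c0 = s.c0 + ((el.map (·.2)).countP (fun c => decide (pvP0 c)) : Int) ∧
    (el.foldl pvStepA s).c1 = s.c1 + ((el.map (·.2)).countP (fun c => decide (pvC1 c)) : Int) ∧
    (el.foldl pvStepA s).c2 = s.c2 + ((el.map (·.2)).countP (fun c => decide (pvC2 c)) : Int) ∧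
    (el.foldl pvStepA s).c3 = s.c3 + ((el.map (·.2)).countP (fun c => decide (pvC3 c)) : Int) ∧
    (el.foldl pvStepA s).c4 = s.c4 + ((el.map (·.2)).countP (fun c => decide (pvC4 c)) : Int) := by
  induction el with
  | nil => intro s; simp
  | cons p t ih =>
    intro s
    obtain ⟨h0, h1, h2, h3, h4⟩ := ih (pvStepA s p)
    obtain ⟨g0, g1, g2, g3, g4⟩ := pvStepA_cnt s p
    simp only [List.foldl_cons, List.map_cons, List.countP_cons, decide_eq_true_eq]
    rw [h0, h1, h2, h3, h4, g0, g1, g2, g3, g4,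
      pvStepCnt_c0, pvStepCnt_c1, pvStepCnt_c2, pvStepCnt_c3, pvStepCnt_c4]
    refine ⟨?_, ?_, ?_, ?_, ?_⟩ <;> split_ifs <;> push_cast <;> ring

-- a run of four equal characters somewhere (the condition both code-4 tests decide)
def pvHas4 : List Char → Bool
  | a :: b :: c :: d :: r => (a == b && b == c && c == d) || pvHas4 (b :: c :: d :: r)
  | _ => false

theorem pvHas4_cons (c : Char) (r : List Char) :
    pvHas4 (c :: r) = true ↔ (List.replicate 3 c <+: r ∨ pvHas4 r = true) := by
  rcases r with _ | ⟨b, _ | ⟨c', _ | ⟨d, rest⟩⟩⟩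
  · constructor
    · intro h; exact absurd h (by simp [pvHas4])
    · rintro (h | h)
      · exact absurd h.length_le (by simp)
      · exact absurd h (by simp [pvHas4])
  · constructor
    · intro h; exact absurd h (by simp [pvHas4])
    · rintro (h | h)
      · exact absurd h.length_le (by simp)
      · exact absurd h (by simp [pvHas4])
  · constructor
    · intro h; exact absurd h (by simp [pvHas4])
    · rintro (h | h)
      · exact absurd h.length_le (by simp)
      · exact absurd h (by simp [pvHas4])
  · have he : pvHas4 (c :: b :: c' :: d :: rest) =
        ((c == b && b == c' && c' == d) || pvHas4 (b :: c' :: d :: rest)) := rfl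
    rw [he, Bool.or_eq_true, Bool.and_eq_true, Bool.and_eq_true]
    simp only [beq_iff_eq]
    constructor
    · rintro (⟨⟨h1, h2⟩, h3⟩ | h)
      · left
        show [c, c, c] <+: b :: c' :: d :: rest
        subst h1; subst h2; subst h3
        exact ⟨rest, rfl⟩
      · right; exact h
    · rintro (h | h)
      · left
        obtain ⟨u, hu⟩ := h
        have : c :: c :: c :: u = b :: c' :: d :: rest := hu
        injection this with e1 this; injection this with e2 this; injection this with e3 _
        exact ⟨⟨e1, e1.symm.trans e2⟩, e2.symm.trans e3⟩
      · right; exact h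

theorem pvPrefix_mono {m n : Nat} (c : Char) (r : List Char) (h : m ≤ n)
    (hp : List.replicate n c <+: r) : List.replicate m c <+: r := by
  have h1 : List.replicate m c <+: List.replicate n c := by
    simpa [List.take_replicate, min_eq_left h] using List.take_prefix m (List.replicate n c)
  exact h1.trans hp

-- once frozen at same >= 4, A's counter never changes again
theorem pvFrozen (el : List (Int × Char)) : ∀ s : PvAState, (∀ p ∈ el, p.1 ≠ 0) →
    4 ≤ s.same → (el.foldl pvStepA s).same = s.same := by
  induction el with
  | nil => intro s _ _; rfl
  | cons p t ih =>
    intro s hne hs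
    have hr := (pvStepA_run s p (hne p (List.mem_cons_self ..))).2
    rw [if_pos (by omega : s.same ≥ 4)] at hr
    simp only [List.foldl_cons]
    rw [ih _ (fun q hq => hne q (List.mem_cons_of_mem _ hq)) (by omega : 4 ≤ (pvStepA s p).same), hr]

-- characterization of A's frozen run counter: a live counter of value k freezes iff the current
-- character's run extends to total length 4 or a fresh 4-run occurs later
theorem pvA4 (t : List Char) : ∀ (i : Int) (s : PvAState),
    (∀ p ∈ PySem.List.enumerate t i, p.1 ≠ 0) → 1 ≤ s.same → s.same ≤ 3 →
    (4 ≤ ((PySem.List.enumerate t i).foldl pvStepA s).same ↔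
      (List.replicate (4 - s.same).toNat s.word <+: t ∨ pvHas4 t = true)) := by
  induction t with
  | nil =>
    intro i s _ h1 h3
    rw [PySem.List.enumerate_nil]
    simp only [List.foldl_nil, pvHas4]
    constructor
    · intro h; omega
    · rintro (h | h)
      · have := h.length_le
        simp only [List.length_replicate, List.length_nil, Nat.le_zero] at this
        omega
      · exact absurd h (by simp)
  | cons c r ih =>
    intro i s hne h1 h3
    rw [PySem.List.enumerate_cons]
    simp only [List.foldl_cons]
    have hi : ((i, c) : Int × Char).1 ≠ 0 :=
      hne (i, c) (by rw [PySem.List.enumerate_cons]; exact List.mem_cons_self ..)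
    have hne' : ∀ p ∈ PySem.List.enumerate r (i + 1), p.1 ≠ 0 := by
      intro p hp; exact hne p (by rw [PySem.List.enumerate_cons]; exact List.mem_cons_of_mem _ hp)
    obtain ⟨hw, hs⟩ := pvStepA_run s (i, c) hi
    rw [if_neg (by omega : ¬ s.same ≥ 4)] at hw hs
    by_cases hwc : s.word = c
    · rw [if_pos hwc] at hs
      by_cases h33 : s.same = 3
      · have hfr : 4 ≤ (pvStepA s (i, c)).same := by omega
        rw [pvFrozen _ _ hne' hfr]
        constructor
        · intro _
          left
          have : ((4 : Int) - s.same).toNat = 1 := by omega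
          rw [this, hwc]
          exact ⟨r, rfl⟩
        · intro _; omega
      · rw [ih (i + 1) (pvStepA s (i, c)) hne' (by omega) (by omega), hw, hs, hwc]
        have harith : ((4 : Int) - (s.same + 1)).toNat + 1 = ((4 : Int) - s.same).toNat := by omega
        constructor
        · rintro (hp | hh)
          · left
            rw [← harith, List.replicate_succ]
            exact List.cons_prefix_cons.mpr ⟨rfl, hp⟩
          · right; rw [pvHas4_cons]; right; exact hh
        · rintro (hp | hh)
          · left
            rw [← harith, List.replicate_succ, List.cons_prefix_cons] at hp
            exact hp.2
          · rcases (pvHas4_cons c r).mp hh with h3r | hr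
            · left; exact pvPrefix_mono c r (by omega) h3r
            · right; exact hr
    · rw [if_neg hwc] at hs
      rw [ih (i + 1) (pvStepA s (i, c)) hne' (by omega) (by omega), hw, hs]
      have harith : ((4 : Int) - 1).toNat = 3 := by decide
      rw [harith, pvHas4_cons]
      constructor
      · rintro (hp | hh)
        · right; left; exact hp
        · right; right; exact hh
      · rintro (hp | h3r | hr)
        · exfalso
          obtain ⟨m, hm⟩ : ∃ m : Nat, ((4 : Int) - s.same).toNat = m + 1 :=
            ⟨((4 : Int) - s.same).toNat - 1, by omega⟩
          rw [hm, List.replicate_succ, List.cons_prefix_cons] at hp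
          exact hwc hp.1
        · left; exact h3r
        · right; exact hr

-- the zip sliding window of B decides pvHas4
theorem pvQuads_any (l : List Char) :
    ((pvQuads l).any (fun q => q.1 == q.2.1 && q.2.1 == q.2.2.1 && q.2.2.1 == q.2.2.2)) = pvHas4 l := by
  induction l using pvHas4.induct with
  | case1 a b c d r ih =>
    have hq : pvQuads (a :: b :: c :: d :: r) = (a, b, c, d) :: pvQuads (b :: c :: d :: r) := by
      simp [pvQuads]
    rw [pvHas4, hq, List.any_cons, ih]
  | case2 l h =>
    rcases l with _ | ⟨a, _ | ⟨b, _ | ⟨c, r⟩⟩⟩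
    · rfl
    · rfl
    · rfl
    · rcases r with _ | _
      · rfl
      · exact absurd rfl (h _ _ _ _ _)

-- B-side classification helper lemmas
theorem pvAddRun_upper (st : PvBState) (c : Char) (run : Int) :
    (pvAddRun st c run).upper = st.upper + (if pvP0 c then run else 0) := by
  unfold pvAddRun
  by_cases h1 : 'A' ≤ c ∧ c ≤ 'Z'
  · rw [if_pos h1, if_pos (h1 : pvP0 c)]
  by_cases h2 : 'a' ≤ c ∧ c ≤ 'z'
  · rw [if_neg h1, if_pos h2, if_neg (h1 : ¬ pvP0 c), add_zero]
  by_cases h3 : '0' ≤ c ∧ c ≤ '9'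
  · rw [if_neg h1, if_neg h2, if_pos h3, if_neg (h1 : ¬ pvP0 c), add_zero]
  by_cases h4 : c ∈ pvSpecial
  · rw [if_neg h1, if_neg h2, if_neg h3, if_pos h4, if_neg (h1 : ¬ pvP0 c), add_zero]
  · rw [if_neg h1, if_neg h2, if_neg h3, if_neg h4, if_neg (h1 : ¬ pvP0 c), add_zero]

theorem pvAddRun_lower (st : PvBState) (c : Char) (run : Int) :
    (pvAddRun st c run).lower = st.lower + (if pvC1 c then run else 0) := by
  unfold pvAddRun
  by_cases h1 : 'A' ≤ c ∧ c ≤ 'Z'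
  · rw [if_pos h1, if_neg (fun hc : pvC1 c => hc.1 h1), add_zero]
  by_cases h2 : 'a' ≤ c ∧ c ≤ 'z'
  · rw [if_neg h1, if_pos h2, if_pos (⟨h1, h2⟩ : pvC1 c)]
  by_cases h3 : '0' ≤ c ∧ c ≤ '9'
  · rw [if_neg h1, if_neg h2, if_pos h3, if_neg (fun hc : pvC1 c => h2 hc.2), add_zero]
  by_cases h4 : c ∈ pvSpecial
  · rw [if_neg h1, if_neg h2, if_neg h3, if_pos h4, if_neg (fun hc : pvC1 c => h2 hc.2), add_zero]
  · rw [if_neg h1, if_neg h2, if_neg h3, if_neg h4, if_neg (fun hc : pvC1 c => h2 hc.2), add_zero]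

theorem pvAddRun_digit (st : PvBState) (c : Char) (run : Int) :
    (pvAddRun st c run).digit = st.digit + (if pvC2 c then run else 0) := by
  unfold pvAddRun
  by_cases h1 : 'A' ≤ c ∧ c ≤ 'Z'
  · rw [if_pos h1, if_neg (fun hc : pvC2 c => hc.1 h1), add_zero]
  by_cases h2 : 'a' ≤ c ∧ c ≤ 'z'
  · rw [if_neg h1, if_pos h2, if_neg (fun hc : pvC2 c => hc.2.1 h2), add_zero]
  by_cases h3 : '0' ≤ c ∧ c ≤ '9'
  · rw [if_neg h1, if_neg h2, if_pos h3, if_pos (⟨h1, h2, h3⟩ : pvC2 c)]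
  by_cases h4 : c ∈ pvSpecial
  · rw [if_neg h1, if_neg h2, if_neg h3, if_pos h4, if_neg (fun hc : pvC2 c => h3 hc.2.2), add_zero]
  · rw [if_neg h1, if_neg h2, if_neg h3, if_neg h4, if_neg (fun hc : pvC2 c => h3 hc.2.2), add_zero]

theorem pvAddRun_spec (st : PvBState) (c : Char) (run : Int) :
    (pvAddRun st c run).spec = st.spec + (if pvC3 c then run else 0) := by
  unfold pvAddRun
  by_cases h1 : 'A' ≤ c ∧ c ≤ 'Z'
  · rw [if_pos h1, if_neg (fun hc : pvC3 c => hc.1 h1), add_zero]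
  by_cases h2 : 'a' ≤ c ∧ c ≤ 'z'
  · rw [if_neg h1, if_pos h2, if_neg (fun hc : pvC3 c => hc.2.1 h2), add_zero]
  by_cases h3 : '0' ≤ c ∧ c ≤ '9'
  · rw [if_neg h1, if_neg h2, if_pos h3, if_neg (fun hc : pvC3 c => hc.2.2.1 h3), add_zero]
  by_cases h4 : c ∈ pvSpecial
  · rw [if_neg h1, if_neg h2, if_neg h3, if_pos h4, if_pos (⟨h1, h2, h3, h4⟩ : pvC3 c)]
  · rw [if_neg h1, if_neg h2, if_neg h3, if_neg h4, if_neg (fun hc : pvC3 c => h4 hc.2.2.2), add_zero]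

theorem pvAddRun_other (st : PvBState) (c : Char) (run : Int) :
    (pvAddRun st c run).other = st.other + (if pvC4 c then run else 0) := by
  unfold pvAddRun
  by_cases h1 : 'A' ≤ c ∧ c ≤ 'Z'
  · rw [if_pos h1, if_neg (fun hc : pvC4 c => hc.1 h1), add_zero]
  by_cases h2 : 'a' ≤ c ∧ c ≤ 'z'
  · rw [if_neg h1, if_pos h2, if_neg (fun hc : pvC4 c => hc.2.1 h2), add_zero]
  by_cases h3 : '0' ≤ c ∧ c ≤ '9'
  · rw [if_neg h1, if_neg h2, if_pos h3, if_neg (fun hc : pvC4 c => hc.2.2.1 h3), add_zero]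
  by_cases h4 : c ∈ pvSpecial
  · rw [if_neg h1, if_neg h2, if_neg h3, if_pos h4, if_neg (fun hc : pvC4 c => hc.2.2.2 h4), add_zero]
  · rw [if_neg h1, if_neg h2, if_neg h3, if_neg h4, if_pos (⟨h1, h2, h3, h4⟩ : pvC4 c)]

theorem pvAddRun_fives (st : PvBState) (c : Char) (run : Int) :
    (pvAddRun st c run).fives = st.fives := by
  unfold pvAddRun; split_ifs <;> rfl

theorem pvNote5_cnt (st : PvBState) (run : Int) :
    (pvNote5 st run).upper = st.upper ∧ (pvNote5 st run).lower = st.lower ∧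
    (pvNote5 st run).digit = st.digit ∧ (pvNote5 st run).spec = st.spec ∧
    (pvNote5 st run).other = st.other := by
  unfold pvNote5; split_ifs <;> exact ⟨rfl, rfl, rfl, rfl, rfl⟩

theorem pvNote5_fives (st : PvBState) (run : Int) :
    (pvNote5 st run).fives = st.fives ++ (if 5 ≤ run then [(5 : Int)] else []) := by
  unfold pvNote5
  split_ifs <;> simp

-- counting a predicate over a block of identical characters
theorem pvCountP_allEq (p : Char → Bool) (c : Char) (b : List Char) (h : ∀ x ∈ b, x = c) :
    b.countP p = if p c then b.length else 0 := by
  induction b with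
  | nil => simp
  | cons x xs ih =>
    have hx : x = c := h x (List.mem_cons_self ..)
    rw [List.countP_cons, ih (fun y hy => h y (List.mem_cons_of_mem _ hy)), hx]
    split_ifs <;> simp_all

theorem pvBlock_eq (c : Char) (rest : List Char) :
    ∀ x ∈ rest.takeWhile (fun x => x == c), x = c := by
  intro x hx
  simpa using List.mem_takeWhile_imp hx

-- B's run scan accumulates exactly the per-class character counts
theorem pvScan_counts (st : PvBState) (chars : List Char) :
    (pvScanRuns st chars).upper = st.upper + (chars.countP (fun c => decide (pvP0 c)) : Int) ∧
    (pvScanRuns st chars).lower = st.lower + (chars.countP (fun c => decide (pvC1 c)) : Int) ∧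
    (pvScanRuns st chars).digit = st.digit + (chars.countP (fun c => decide (pvC2 c)) : Int) ∧
    (pvScanRuns st chars).spec = st.spec + (chars.countP (fun c => decide (pvC3 c)) : Int) ∧
    (pvScanRuns st chars).other = st.other + (chars.countP (fun c => decide (pvC4 c)) : Int) := by
  induction st, chars using pvScanRuns.induct with
  | case1 st => simp [pvScanRuns]
  | case2 st c rest ih =>
    obtain ⟨i0, i1, i2, i3, i4⟩ := ih
    obtain ⟨n0, n1, n2, n3, n4⟩ := pvNote5_cnt
      (pvAddRun st c ((rest.takeWhile (fun x => x == c)).length + 1))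
      ((rest.takeWhile (fun x => x == c)).length + 1)
    have hcnt : ∀ p : Char → Bool, (c :: rest).countP p =
        (if p c then (rest.takeWhile (fun x => x == c)).length + 1 else 0) +
          (rest.dropWhile (fun x => x == c)).countP p := by
      intro p
      conv_lhs => rw [show c :: rest =
        (c :: rest.takeWhile (fun x => x == c)) ++ rest.dropWhile (fun x => x == c) by
          simp [List.takeWhile_append_dropWhile]]
      rw [List.countP_append, List.countP_cons, pvCountP_allEq p c _ (pvBlock_eq c rest)]
      split_ifs <;> simp <;> omega
    rw [pvScanRuns]
    refine ⟨?_, ?_, ?_, ?_, ?_⟩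
    · rw [i0, n0, pvAddRun_upper, hcnt]
      simp only [decide_eq_true_eq]
      split_ifs <;> push_cast <;> omega
    · rw [i1, n1, pvAddRun_lower, hcnt]
      simp only [decide_eq_true_eq]
      split_ifs <;> push_cast <;> omega
    · rw [i2, n2, pvAddRun_digit, hcnt]
      simp only [decide_eq_true_eq]
      split_ifs <;> push_cast <;> omega
    · rw [i3, n3, pvAddRun_spec, hcnt]
      simp only [decide_eq_true_eq]
      split_ifs <;> push_cast <;> omega
    · rw [i4, n4, pvAddRun_other, hcnt]
      simp only [decide_eq_true_eq]
      split_ifs <;> push_cast <;> omega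

-- in a sorted list, dropping the leading block of c's drops every c
theorem pvNotMem_dropWhile (rest : List Char) : ∀ c : Char, (∀ x ∈ rest, c ≤ x) →
    rest.Pairwise (· ≤ ·) → c ∉ rest.dropWhile (fun x => x == c) := by
  induction rest with
  | nil => intro c _ _; simp
  | cons d rs ih =>
    intro c hle hp
    by_cases hdc : d = c
    · rw [List.dropWhile_cons_of_pos (by simp [hdc])]
      exact ih c (fun x hx => hle x (List.mem_cons_of_mem _ hx)) (List.Pairwise.of_cons hp)
    · rw [List.dropWhile_cons_of_neg (by simp [hdc])]
      intro hmem
      rcases List.mem_cons.mp hmem with h | h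
      · exact hdc h.symm
      · have hcd : c ≤ d := hle d (List.mem_cons_self ..)
        have hdx : d ≤ c := (List.pairwise_cons.mp hp).1 c h
        exact hdc (le_antisymm hdx hcd)

-- B's run scan emits one 5 per maximal run of length >= 5; on a sorted list that is one 5
-- per distinct character occurring at least 5 times
theorem pvScan_fives (st : PvBState) (chars : List Char) :
    chars.Pairwise (· ≤ ·) →
    (pvScanRuns st chars).fives = st.fives ++
      List.replicate ((PySem.Set.ofList chars).countP (fun x => decide (5 ≤ chars.count x))) 5 := by
  induction st, chars using pvScanRuns.induct with
  | case1 st => intro _; simp [pvScanRuns]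
  | case2 st c rest ih =>
    intro hp
    have hble := pvBlock_eq c rest
    have hsplit : rest = rest.takeWhile (fun x => x == c) ++ rest.dropWhile (fun x => x == c) :=
      (List.takeWhile_append_dropWhile).symm
    have hcle : ∀ x ∈ rest, c ≤ x := (List.pairwise_cons.mp hp).1
    have hpr : (rest.dropWhile (fun x => x == c)).Pairwise (· ≤ ·) :=
      List.Pairwise.sublist (List.dropWhile_sublist _) (List.Pairwise.of_cons hp)
    have hcnot : c ∉ rest.dropWhile (fun x => x == c) :=
      pvNotMem_dropWhile rest c hcle (List.Pairwise.of_cons hp)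
    -- every element of chars is c or an element of the dropped tail
    have hmem : ∀ x, x ∈ c :: rest ↔ (x = c ∨ x ∈ rest.dropWhile (fun x => x == c)) := by
      intro x
      constructor
      · intro hx
        rcases List.mem_cons.mp hx with h | h
        · left; exact h
        · rw [hsplit] at h
          rcases List.mem_append.mp h with h | h
          · left; exact hble x h
          · right; exact h
      · rintro (h | h)
        · rw [h]; exact List.mem_cons_self ..
        · exact List.mem_cons_of_mem _ ((hsplit ▸ List.mem_append_right _ h))
    -- count of c in chars is the run length; counts of tail elements are unchanged
    have hcountc : (c :: rest).count c = (rest.takeWhile (fun x => x == c)).length + 1 := by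
      rw [List.count_cons_self]
      congr 1
      conv_lhs => rw [hsplit]
      rw [List.count_append, List.count_eq_zero.mpr hcnot, Nat.add_zero]
      exact List.count_eq_length.mpr (fun b hb => (hble b hb).symm)
    have hcountx : ∀ x ∈ rest.dropWhile (fun x => x == c),
        (c :: rest).count x = (rest.dropWhile (fun x => x == c)).count x := by
      intro x hx
      have hxc : x ≠ c := fun h => hcnot (h ▸ hx)
      have hx0 : x ∉ c :: rest.takeWhile (fun x => x == c) := by
        intro hmem'
        rcases List.mem_cons.mp hmem' with h | h
        · exact hxc h
        · exact hxc (hble x h)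
      conv_lhs => rw [show c :: rest =
        (c :: rest.takeWhile (fun x => x == c)) ++ rest.dropWhile (fun x => x == c) by
          rw [List.cons_append, ← hsplit]]
      rw [List.count_append, List.count_eq_zero.mpr hx0, Nat.zero_add]
    -- replace the dedup of chars by c :: dedup of the dropped tail
    have hnd2 : (c :: PySem.Set.ofList (rest.dropWhile (fun x => x == c))).Nodup := by
      rw [List.nodup_cons]
      exact ⟨fun h => hcnot ((PySem.Set.mem_ofList _ _).mp h), PySem.Set.nodup_ofList _⟩
    have hperm : (PySem.Set.ofList (c :: rest)).Perm
        (c :: PySem.Set.ofList (rest.dropWhile (fun x => x == c))) := by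
      rw [List.perm_ext_iff_of_nodup (PySem.Set.nodup_ofList _) hnd2]
      intro a
      have h := hmem a
      simp only [List.mem_cons] at h
      simpa only [PySem.Set.mem_ofList, List.mem_cons] using h
    rw [pvScanRuns, ih hpr, pvNote5_fives, pvAddRun_fives,
      hperm.countP_eq, List.countP_cons]
    have hpc : (decide (5 ≤ (c :: rest).count c) = true) ↔
        (5 ≤ ((rest.takeWhile (fun x => x == c)).length : Int) + 1) := by
      rw [decide_eq_true_eq, hcountc]; omega
    have hcg : (PySem.Set.ofList (rest.dropWhile (fun x => x == c))).countP
          (fun x => decide (5 ≤ (c :: rest).count x)) =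
        (PySem.Set.ofList (rest.dropWhile (fun x => x == c))).countP
          (fun x => decide (5 ≤ (rest.dropWhile (fun x => x == c)).count x)) := by
      apply List.countP_congr
      intro x hx
      rw [hcountx x ((PySem.Set.mem_ofList _ _).mp hx)]
    rw [hcg]
    by_cases h5 : 5 ≤ ((rest.takeWhile (fun x => x == c)).length : Int) + 1
    · rw [if_pos h5, if_pos (hpc.mpr h5)]
      rw [List.append_assoc,
        show ∀ (m : Nat), ([(5 : Int)] ++ List.replicate m 5) = List.replicate (m + 1) 5
          from fun m => List.replicate_succ.symm]
    · rw [if_neg h5, if_neg (fun hh => h5 (hpc.mp hh))]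
      simp

theorem pvIteApp {c : Prop} [Decidable c] (a x : List Int) :
    (if c then a ++ x else a) = a ++ (if c then x else []) := by
  split_ifs <;> simp

-- the main equivalence on non-empty strings
theorem pvMain (inp : String) (w0 : Char) (t : List Char) (hl : inp.toList = w0 :: t) :
    solution inp = solution_alt inp := by
  have hsp : (PySem.List.sorted (w0 :: t) (fun x => x) false).Perm (w0 :: t) :=
    PySem.List.sorted_perm _ _ _
  simp only [solution, solution_alt, hl]
  -- A: counter values
  obtain ⟨hc0, hc1, hc2, hc3, hc4⟩ := pvFoldA_counts (PySem.List.enumerate (w0 :: t))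
    { c0 := 0, c1 := 0, c2 := 0, c3 := 0, c4 := 0, word := w0, same := 1 }
  rw [PySem.List.map_snd_enumerate] at hc0 hc1 hc2 hc3 hc4
  -- B: counter values, rewritten to counts over the unsorted list
  obtain ⟨hb0, hb1, hb2, hb3, hb4⟩ := pvScan_counts ⟨0, 0, 0, 0, 0, []⟩
    (PySem.List.sorted (w0 :: t) (fun x => x) false)
  rw [hsp.countP_eq] at hb0 hb1 hb2 hb3 hb4
  -- A: the frozen run counter decides pvHas4, as does B's zip window
  have hel : PySem.List.enumerate (w0 :: t) = (0, w0) :: PySem.List.enumerate t 1 := by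
    rw [PySem.List.enumerate_cons]; norm_num
  have hz := pvStepA_zero { c0 := 0, c1 := 0, c2 := 0, c3 := 0, c4 := 0, word := w0, same := 1 }
    (0, w0) rfl
  have hne : ∀ p ∈ PySem.List.enumerate t 1, p.1 ≠ 0 := by
    intro p hp
    rw [PySem.List.mem_enumerate_iff] at hp
    obtain ⟨k, hk, rfl⟩ := hp
    simp only [ne_eq]
    omega
  have hrun := pvA4 t 1 (pvStepA { c0 := 0, c1 := 0, c2 := 0, c3 := 0, c4 := 0, word := w0, same := 1 } (0, w0))
    hne (by rw [hz.2]) (by rw [hz.2]; norm_num)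
  rw [hz.1, hz.2] at hrun
  have h4 : (((PySem.List.enumerate (w0 :: t)).foldl pvStepA
      { c0 := 0, c1 := 0, c2 := 0, c3 := 0, c4 := 0, word := w0, same := 1 }).same ≥ 4) =
      ((pvQuads (w0 :: t)).any
        (fun q => q.1 == q.2.1 && q.2.1 == q.2.2.1 && q.2.2.1 == q.2.2.2) = true) := by
    apply propext
    rw [hel, List.foldl_cons, pvQuads_any, pvHas4_cons]
    have h31 : ((4 : Int) - 1).toNat = 3 := by decide
    rw [h31] at hrun
    exact hrun
  -- A: the code-5 loop over the dedup set, as a replicate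
  rw [PySem.List.foldl_append_ite
    (p := fun s => 5 ≤ PySem.List.count (w0 :: t) s) (f := fun _ => (5 : Int))]
  rw [List.map_const', ← List.countP_eq_length_filter]
  -- B: the per-run fives, rewritten to the same count
  have hb5 := pvScan_fives ⟨0, 0, 0, 0, 0, []⟩ (PySem.List.sorted (w0 :: t) (fun x => x) false)
    (by simpa using PySem.List.sorted_pairwise (w0 :: t) (fun x => x))
  have hnd2 : (PySem.Set.ofList (w0 :: t)).Nodup := PySem.Set.nodup_ofList _
  have hperm5 : (PySem.Set.ofList (PySem.List.sorted (w0 :: t) (fun x => x) false)).Perm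
      (PySem.Set.ofList (w0 :: t)) := by
    rw [List.perm_ext_iff_of_nodup (PySem.Set.nodup_ofList _) hnd2]
    intro a
    rw [PySem.Set.mem_ofList, PySem.Set.mem_ofList]
    exact hsp.mem_iff
  have hcnt5 : (PySem.Set.ofList (PySem.List.sorted (w0 :: t) (fun x => x) false)).countP
        (fun x => decide (5 ≤ (PySem.List.sorted (w0 :: t) (fun x => x) false).count x)) =
      (PySem.Set.ofList (w0 :: t)).countP (fun x => decide (5 ≤ PySem.List.count (w0 :: t) x)) := by
    rw [hperm5.countP_eq]
    apply List.countP_congr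
    intro x _
    rw [hsp.count_eq, PySem.List.count_eq]
  rw [hcnt5] at hb5
  -- now rewrite every projection and condition on both sides and normalize the appends
  simp only [hc0, hc1, hc2, hc3, hc4, hb0, hb1, hb2, hb3, hb4, hb5, h4]
  simp only [zero_add, List.nil_append, pvIteApp, List.append_assoc, List.length_eq_zero_iff]

-- ===== VERDICT (by name: the statement is the Claim_ definition above) =====
theorem solution_spec : Claim_equal_solution := by
  intro inp _ hpre
  unfold Spec_solution
  have h : inp.toList ≠ [] := fun hnil => hpre (String.toList_eq_nil_iff.mp hnil)
  obtain ⟨w0, t, hl⟩ : ∃ w0 t, inp.toList = w0 :: t := by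
    cases hli : inp.toList with
    | nil => exact absurd hli h
    | cons a b => exact ⟨a, b, rfl⟩
  exact pvMain inp w0 t hl

theorem solution_raises : Claim_raises_solution := by
  unfold Claim_raises_solution
  refine ⟨fun s _ h hpre => hpre h, by decide, rfl, ?_⟩
  show solution_alt "" = [1, 3]
  have hscan : pvScanRuns ⟨0, 0, 0, 0, 0, []⟩
      (PySem.List.sorted (("" : String).toList) (fun x => x) false) = ⟨0, 0, 0, 0, 0, []⟩ := by
    rw [show PySem.List.sorted (("" : String).toList) (fun x => x) false = [] from rfl]
    rw [pvScanRuns]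
  simp only [solution_alt, hscan]
  decide

-- self-check: the crash-fix witness value really is what B's port returns on ""
theorem pvRaiseWitness_ok : solution_alt pvRaiseWitness_solution = pvRaiseWitnessOut_solution :=
  solution_raises.2.2.2
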